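-- pv_equiv track=rewrite | github.com/asaenz16/URSA23 | Summer 24 Code/combine/GapProb.py | gap_subCv3
-- ===== SOURCE A (Python) =====
-- def gap_subCv3(j, k, Config):
--     sC = [[] for x in range(j, k)]
--     N = len(Config)
--     for n in range(N):
--         last = Config[n][-1]
--         if last >= j and last < k:
--             sC[last-j].append(n)
--     return sC
-- ===== SOURCE B (Python) =====
-- def gap_subCv3(j, k, Config):
--     return [[n for n, c in enumerate(Config) if c[-1] == v] for v in range(j, k)]
-- ===== Notes on version B (the rewrite author's own statement) =====
-- stated objective: idiomatic
-- what changed: Replaces the single pass that preallocates buckets and appends into sC[last-j] by a per-value comprehension that rescans Config once for each value v in range(j,k).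
import Mathlib
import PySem

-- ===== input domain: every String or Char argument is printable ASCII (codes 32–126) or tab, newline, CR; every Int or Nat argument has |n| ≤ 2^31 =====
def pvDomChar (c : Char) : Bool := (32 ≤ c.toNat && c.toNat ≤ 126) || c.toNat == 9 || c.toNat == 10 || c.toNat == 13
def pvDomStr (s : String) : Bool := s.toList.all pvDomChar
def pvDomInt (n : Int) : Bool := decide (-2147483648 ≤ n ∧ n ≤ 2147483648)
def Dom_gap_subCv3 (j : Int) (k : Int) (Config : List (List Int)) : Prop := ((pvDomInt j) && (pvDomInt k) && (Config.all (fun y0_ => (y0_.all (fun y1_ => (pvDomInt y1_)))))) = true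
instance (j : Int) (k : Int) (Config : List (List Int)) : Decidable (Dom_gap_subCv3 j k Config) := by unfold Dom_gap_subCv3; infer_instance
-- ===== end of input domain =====

-- B replaces A's one-pass bucket fill with a per-value rescan comprehension (idiomatic, not faster).

-- ===== PORT A =====
-- one pass over range(len(Config)), appending n into the preallocated bucket sC[last-j]
def gap_subCv3 (j : Int) (k : Int) (Config : List (List Int)) : List (List Int) :=
  let sC0 : List (List Int) := (PySem.List.pyRange j k 1).map (fun _ => ([] : List Int))
  let N : Int := PySem.List.len Config
  (PySem.List.pyRange 0 N 1).foldl (fun sC n =>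
    match PySem.List.pyGet? (PySem.List.pyGetD Config n []) (-1) with
    | none => sC          -- Python raises IndexError here; excluded by Pre_
    | some last =>
      if last ≥ j ∧ last < k then sC.modify (last - j).toNat (fun b => b ++ [n]) else sC) sC0

-- ===== PORT B =====
-- for each v in range(j,k), scan enumerate(Config) collecting the indices whose row ends in v
def gap_subCv3_alt (j : Int) (k : Int) (Config : List (List Int)) : List (List Int) :=
  (PySem.List.pyRange j k 1).map (fun v =>
    (PySem.List.enumerate Config).filterMap (fun p =>
      if PySem.List.pyGet? p.2 (-1) = some v then some p.1 else none))

-- ===== PRECONDITION & SPEC =====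
-- Pre_ excludes Config containing an empty row, on which Python's Config[n][-1] raises IndexError (in both A and B).
def Pre_gap_subCv3 (j : Int) (k : Int) (Config : List (List Int)) : Prop := ∀ c ∈ Config, c ≠ []
instance (j : Int) (k : Int) (Config : List (List Int)) : Decidable (Pre_gap_subCv3 j k Config) := by unfold Pre_gap_subCv3; infer_instance
def pvWitness_gap_subCv3 : Int × Int × List (List Int) := (0, 3, [[1, 2], [5, 0], [2]])

def Spec_gap_subCv3 (j : Int) (k : Int) (Config : List (List Int)) (out : List (List Int)) : Prop := out = gap_subCv3_alt j k Config
instance (j : Int) (k : Int) (Config : List (List Int)) (out : List (List Int)) : Decidable (Spec_gap_subCv3 j k Config out) := by unfold Spec_gap_subCv3; infer_instance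

-- ===== CLAIM (what is proved, stated in full; the proofs are below) =====
def Claim_equal_gap_subCv3 : Prop := ∀ (j : Int) (k : Int) (Config : List (List Int)), Dom_gap_subCv3 j k Config → Pre_gap_subCv3 j k Config → Spec_gap_subCv3 j k Config (gap_subCv3 j k Config)

-- ===== LEMMAS AND PROOFS =====

-- the bucket of value v extracted from a list of (index, row) pairs, as B computes it
def pvMatches (v : Int) (l : List (Int × List Int)) : List Int :=
  l.filterMap (fun p => if PySem.List.pyGet? p.2 (-1) = some v then some p.1 else none)

lemma pvMatches_cons (v : Int) (p : Int × List Int) (l : List (Int × List Int)) :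
    pvMatches v (p :: l) =
      (if PySem.List.pyGet? p.2 (-1) = some v then [p.1] else []) ++ pvMatches v l := by
  by_cases h : PySem.List.pyGet? p.2 (-1) = some v <;>
    simp [pvMatches, List.filterMap_cons, h]

-- A's fold over pairs, starting from any accumulator of the right length,
-- appends each pair's bucket contribution pointwise.
lemma pv_fold_eq (j k : Int) (l : List (Int × List Int)) :
    ∀ sC : List (List Int), sC.length = (PySem.List.pyRange j k 1).length →
      l.foldl (fun sC (p : Int × List Int) =>
        match PySem.List.pyGet? p.2 (-1) with
        | none => sC
        | some last =>
          if last ≥ j ∧ last < k then sC.modify (last - j).toNat (fun b => b ++ [p.1]) else sC) sC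
      = List.zipWith (fun b v => b ++ pvMatches v l) sC (PySem.List.pyRange j k 1) := by
  induction l with
  | nil =>
    intro sC h
    apply List.ext_getElem
    · simp [pvMatches, List.length_zipWith, h]
    · intro i h1 h2
      simp [pvMatches, List.getElem_zipWith]
  | cons p rest ih =>
    intro sC h
    simp only [List.foldl_cons]
    cases hg : PySem.List.pyGet? p.2 (-1) with
    | none =>
      simp only [hg]
      rw [ih sC h]
      apply List.ext_getElem
      · simp [List.length_zipWith]
      · intro i h1 h2
        simp [List.getElem_zipWith, pvMatches_cons, hg]
    | some last =>
      simp only [hg]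
      by_cases hr : last ≥ j ∧ last < k
      · simp only [if_pos hr]
        rw [ih _ (by simp [List.length_modify, h])]
        apply List.ext_getElem
        · simp [List.length_zipWith, List.length_modify]
        · intro i h1 h2
          have hi : i < (PySem.List.pyRange j k 1).length := by
            simp [List.length_zipWith, List.length_modify, h] at h1 ⊢; omega
          have hiv : (PySem.List.pyRange j k 1)[i] = j + (i : Int) :=
            PySem.List.getElem_pyRange_one j k i hi
          have hisC : i < sC.length := by omega
          simp only [List.getElem_zipWith, hiv, pvMatches_cons, hg]
          rw [List.getElem_modify]
          by_cases he : (last - j).toNat = i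
          · have : last = j + (i : Int) := by omega
            simp [he, this]
          · have : ¬ last = j + (i : Int) := by omega
            simp [he, this]
      · simp only [if_neg hr]
        rw [ih sC h]
        apply List.ext_getElem
        · simp [List.length_zipWith]
        · intro i h1 h2
          have hi : i < (PySem.List.pyRange j k 1).length := by
            simp [List.length_zipWith, h] at h1 ⊢; omega
          have hiv : (PySem.List.pyRange j k 1)[i] = j + (i : Int) :=
            PySem.List.getElem_pyRange_one j k i hi
          have : ¬ last = j + (i : Int) := by
            have := PySem.List.length_pyRange_one j k
            intro hc; apply hr; omega
          simp [List.getElem_zipWith, pvMatches_cons, hg, hiv, this]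

-- ===== VERDICT (by name: the statement is the Claim_ definition above) =====
theorem gap_subCv3_spec : Claim_equal_gap_subCv3 := by
  intro j k Config _ _
  unfold Spec_gap_subCv3 gap_subCv3 gap_subCv3_alt
  rw [PySem.List.enumerate_eq_map_pyRange Config ([] : List Int)]
  have h := pv_fold_eq j k
    ((PySem.List.pyRange 0 (PySem.List.len Config)).map (fun n => (n, PySem.List.pyGetD Config n [])))
    ((PySem.List.pyRange j k 1).map (fun _ => ([] : List Int))) (by simp)
  rw [List.foldl_map] at h
  refine h.trans ?_
  apply List.ext_getElem
  · simp [List.length_zipWith]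
  · intro i h1 h2
    simp [List.getElem_zipWith, pvMatches]
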